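-- pv_equiv track=rewrite | github.com/FernandoBarrz/python-work-out-exercises | strings/exercise-7/exercise-7.py | ubbi_dubbi
-- ===== SOURCE A (Python) =====
-- def ubbi_dubbi(word_to_translate: str) -> str:
--     '''
--         Assuming that word_to_translate is an English word with no capital letters or punctuation.
--     '''
--
--     VOWELS = ('a', 'e', 'i', 'o', 'u')
--
--     ub_word = []
--
--     for word in list(word_to_translate):
--         if word in VOWELS:
--             ub_word.append(f'ub{word}')
--         else:
--             ub_word.append(word)
--     return "".join(ub_word)
-- ===== SOURCE B (Python) =====
-- def ubbi_dubbi(word_to_translate: str) -> str: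
--     '''
--         Assuming that word_to_translate is an English word with no capital letters or punctuation.
--     '''
--     cuts = [i for i, c in enumerate(word_to_translate) if c in 'aeiou']
--     parts = [word_to_translate[a:b]
--              for a, b in zip([0] + cuts, cuts + [len(word_to_translate)])]
--     return 'ub'.join(parts)
-- ===== Notes on version B (the rewrite author's own statement) =====
-- stated objective: alternative
-- what changed: Instead of mapping each character to its replacement and joining the per-character pieces, B computes the vowel cut positions, slices the word into the segments between consecutive cuts, and joins those segments with the constant two-character separator (prefixing each vowel is exactly joining the segments cut before each vowel).
import Mathlib
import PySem

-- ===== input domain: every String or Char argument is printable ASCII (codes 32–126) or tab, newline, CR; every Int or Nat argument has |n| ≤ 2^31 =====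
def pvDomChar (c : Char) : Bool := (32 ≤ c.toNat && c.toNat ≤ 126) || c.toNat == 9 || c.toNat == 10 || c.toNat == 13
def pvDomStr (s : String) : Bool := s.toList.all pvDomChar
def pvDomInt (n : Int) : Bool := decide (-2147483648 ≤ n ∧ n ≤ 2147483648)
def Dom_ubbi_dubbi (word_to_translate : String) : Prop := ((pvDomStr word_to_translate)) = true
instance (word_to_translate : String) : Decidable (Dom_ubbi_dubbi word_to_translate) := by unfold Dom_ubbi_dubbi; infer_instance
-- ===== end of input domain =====

-- B cuts the word into the segments before each vowel and joins them with the constant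
-- separator 'ub', instead of A's per-character map-and-join pass (alternative; same cost).

-- ===== PORT A =====
-- A: loop over the characters, append 'ub'+c for vowels else c, join at the end.
def ubbi_dubbi (word_to_translate : String) : String :=
  let VOWELS : List Char := ['a', 'e', 'i', 'o', 'u']
  let ub_word : List String :=
    word_to_translate.toList.foldl (fun acc word =>
      if word ∈ VOWELS then acc ++ ["ub".push word] else acc ++ [String.singleton word]) []
  PySem.Str.join "" ub_word

-- ===== PORT B =====
-- B: cuts = [i for i, c in enumerate(word) if c in 'aeiou']   (the vowel positions)
def pvCutsFrom (cs : List Char) (s : Int) : List Int :=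
  (PySem.List.enumerate cs s).filterMap
    (fun p => if p.2 ∈ "aeiou".toList then some p.1 else none)

-- parts = [word[a:b] for a, b in zip([0] + cuts, cuts + [len(word)])]; 'ub'.join(parts)
def ubbi_dubbi_alt (word_to_translate : String) : String :=
  let cs : List Char := word_to_translate.toList
  let cuts : List Int := pvCutsFrom cs 0
  let parts : List String :=
    (((0 : Int) :: cuts).zip (cuts ++ [(cs.length : Int)])).map
      (fun ab => String.ofList (PySem.List.slice cs (some ab.1) (some ab.2)))
  PySem.Str.join "ub" parts

-- ===== PRECONDITION & SPEC =====
def Spec_ubbi_dubbi (word_to_translate : String) (out : String) : Prop := out = ubbi_dubbi_alt word_to_translate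
instance (word_to_translate : String) (out : String) : Decidable (Spec_ubbi_dubbi word_to_translate out) := by unfold Spec_ubbi_dubbi; infer_instance

-- ===== CLAIM =====
def Claim_equal_ubbi_dubbi : Prop := ∀ (word_to_translate : String), Dom_ubbi_dubbi word_to_translate → Spec_ubbi_dubbi word_to_translate (ubbi_dubbi word_to_translate)

-- ===== LEMMAS AND PROOFS =====

-- the common expansion: each vowel becomes 'u','b',c; every other char stays
def pvExpand (cs : List Char) : List Char :=
  cs.flatMap (fun c => if c ∈ (['a','e','i','o','u'] : List Char) then ['u','b',c] else [c])

-- A's foldl with trailing append produces the per-char pieces in order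
lemma foldA (l : List Char) (acc : List String) :
    l.foldl (fun acc word =>
      if word ∈ (['a','e','i','o','u'] : List Char) then acc ++ ["ub".push word]
      else acc ++ [String.singleton word]) acc
    = acc ++ l.map (fun c => if c ∈ (['a','e','i','o','u'] : List Char)
        then "ub".push c else String.singleton c) := by
  induction l generalizing acc with
  | nil => simp
  | cons c t ih =>
      rw [List.foldl_cons, List.map_cons, ih]
      by_cases h : c ∈ (['a','e','i','o','u'] : List Char) <;>
        simp [h, List.append_assoc]

lemma interc_nil (l : List (List Char)) : List.intercalate [] l = l.flatten := by
  induction l with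
  | nil => rfl
  | cons a t ih =>
      cases t with
      | nil => simp [List.intercalate]
      | cons b r =>
          simp only [List.intercalate, List.intersperse] at ih ⊢
          simp [ih]

-- ''.join(pieces) is the concatenation of the pieces' characters
lemma join_pieces (pieces : List String) :
    PySem.Str.join "" pieces = String.ofList (pieces.flatMap String.toList) := by
  have h := PySem.Str.toList_join "" pieces
  have h2 : String.ofList (PySem.Str.join "" pieces).toList = PySem.Str.join "" pieces :=
    String.ofList_toList
  rw [← h2, h]
  simp [PySem.Chars.join, interc_nil, List.flatMap_def]

-- A's result is the expansion
lemma A_eq_expand (w : String) : ubbi_dubbi w = String.ofList (pvExpand w.toList) := by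
  unfold ubbi_dubbi
  dsimp only
  rw [foldA, List.nil_append, join_pieces]
  congr 1
  simp only [pvExpand, List.flatMap_def, List.map_map]
  refine congrArg List.flatten (List.map_congr_left (fun c _ => ?_))
  show (if c ∈ (['a','e','i','o','u'] : List Char) then "ub".push c
        else String.singleton c).toList
      = (if c ∈ (['a','e','i','o','u'] : List Char) then ['u','b',c] else [c])
  by_cases h : c ∈ (['a','e','i','o','u'] : List Char)
  · rw [if_pos h, if_pos h, String.toList_push]
    rfl
  · rw [if_neg h, if_neg h]
    simp [String.singleton, String.toList_push]

-- intercalate over a nonempty tail peels the head segment and one separator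
lemma interc_cons (sep x : List Char) (l : List (List Char)) (h : l ≠ []) :
    List.intercalate sep (x :: l) = x ++ sep ++ List.intercalate sep l := by
  cases l with
  | nil => exact absurd rfl h
  | cons y ys => simp [List.intercalate, List.intersperse]

-- extending a natural slice by one position appends that character
lemma slice_succ_right (full : List Char) (a s : Nat) (ha : a ≤ s) (hs : s < full.length) :
    PySem.List.slice full (some (a : Int)) (some (((s + 1 : Nat)) : Int))
      = PySem.List.slice full (some (a : Int)) (some (s : Int)) ++ [full[s]] := by
  rw [PySem.List.slice_natCast, PySem.List.slice_natCast]
  have h1 : s + 1 - a = (s - a) + 1 := by omega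
  rw [h1, List.take_add_one]
  congr 1
  rw [List.getElem?_drop]
  have h2 : a + (s - a) = s := by omega
  rw [h2, List.getElem?_eq_getElem hs]
  rfl

-- key invariant: joining the slices cut at the vowel positions of the suffix cs
-- (starting at offset s, with an open segment that began at a) with 'ub'
-- yields the pending segment followed by the expansion of cs
lemma split_loop (full : List Char) (cs : List Char) (s a : Nat) (ha : a ≤ s)
    (hlen : s + cs.length = full.length) (hdrop : full.drop s = cs) :
    List.intercalate ['u','b']
      ((((a : Int) :: pvCutsFrom cs (s : Int)).zip
          (pvCutsFrom cs (s : Int) ++ [(full.length : Int)])).map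
        (fun ab => PySem.List.slice full (some ab.1) (some ab.2)))
    = PySem.List.slice full (some (a : Int)) (some (s : Int)) ++ pvExpand cs := by
  induction cs generalizing s a with
  | nil =>
      have hsn : s = full.length := by simpa using hlen
      subst hsn
      simp [pvCutsFrom, PySem.List.enumerate, pvExpand, List.intercalate, List.intersperse]
  | cons c t ih =>
      have hs : s < full.length := by simp at hlen; omega
      have hdrop' : full.drop s = full[s] :: full.drop (s + 1) :=
        List.drop_eq_getElem_cons hs
      have hc : full[s] = c := by rw [hdrop'] at hdrop; exact (List.cons.injEq .. ▸ hdrop).1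
      have hdt : full.drop (s + 1) = t := by rw [hdrop'] at hdrop; exact (List.cons.injEq .. ▸ hdrop).2
      have hlt : (s + 1) + t.length = full.length := by simp at hlen; omega
      have hcuts : pvCutsFrom (c :: t) (s : Int)
          = (if c ∈ "aeiou".toList then [(s : Int)] else []) ++ pvCutsFrom t ((s : Int) + 1) := by
        rw [pvCutsFrom, PySem.List.enumerate_cons, List.filterMap_cons]
        by_cases hv : c ∈ "aeiou".toList
        · rw [if_pos hv, if_pos hv]
          rfl
        · rw [if_neg hv, if_neg hv]
          rfl
      have hsucc : (((s + 1 : Nat)) : Int) = (s : Int) + 1 := by push_cast; ring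
      rw [← hsucc] at hcuts
      have haeiou : ("aeiou".toList) = (['a','e','i','o','u'] : List Char) := by decide
      by_cases hv : c ∈ (['a','e','i','o','u'] : List Char)
      · -- vowel: a cut at s closes the pending segment; 'ub' is inserted before c
        rw [hcuts, if_pos (haeiou ▸ hv)]
        have hzip : (((a : Int) :: ([(s : Int)] ++ pvCutsFrom t (((s + 1 : Nat)) : Int))).zip
              (([(s : Int)] ++ pvCutsFrom t (((s + 1 : Nat)) : Int)) ++ [(full.length : Int)]))
            = ((a : Int), (s : Int)) :: (((s : Int) :: pvCutsFrom t (((s + 1 : Nat)) : Int)).zip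
              (pvCutsFrom t (((s + 1 : Nat)) : Int) ++ [(full.length : Int)])) := by
          simp [List.zip]
        rw [hzip, List.map_cons]
        have hne : (((s : Int) :: pvCutsFrom t (((s + 1 : Nat)) : Int)).zip
              (pvCutsFrom t (((s + 1 : Nat)) : Int) ++ [(full.length : Int)])).map
            (fun ab => PySem.List.slice full (some ab.1) (some ab.2)) ≠ [] := by
          simp [List.zip]
        rw [interc_cons _ _ _ hne]
        rw [ih (s + 1) s (by omega) hlt hdt]
        have hself : PySem.List.slice full (some (s : Int)) (some (s : Int)) = [] := by
          rw [PySem.List.slice_natCast]; simp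
        have hone : PySem.List.slice full (some (s : Int)) (some (((s + 1 : Nat)) : Int)) = [c] := by
          rw [slice_succ_right full s s le_rfl hs, hself, hc]
          rfl
        rw [hone]
        simp only [pvExpand, List.flatMap_cons]
        rw [if_pos hv]
        simp [List.append_assoc]
      · -- not a vowel: the pending segment simply grows by one character
        rw [hcuts, if_neg (haeiou ▸ hv), List.nil_append,
          ih (s + 1) a (by omega) hlt hdt,
          slice_succ_right full a s ha hs, hc]
        simp only [pvExpand, List.flatMap_cons]
        rw [if_neg hv]
        simp [List.append_assoc]

-- ===== VERDICT =====
theorem ubbi_dubbi_spec : Claim_equal_ubbi_dubbi := by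
  intro w _
  unfold Spec_ubbi_dubbi ubbi_dubbi_alt
  dsimp only
  rw [A_eq_expand w]
  have hsplit := split_loop w.toList w.toList 0 0 le_rfl (by simp) (by simp)
  have h0 : (((0 : Nat)) : Int) = (0 : Int) := rfl
  rw [h0] at hsplit
  have hself : PySem.List.slice w.toList (some (0 : Int)) (some (0 : Int)) = [] := by
    have := PySem.List.slice_natCast (xs := w.toList) (a := 0) (b := 0)
    simpa using this
  rw [hself, List.nil_append] at hsplit
  have key : (PySem.Str.join "ub"
      ((((0 : Int) :: pvCutsFrom w.toList 0).zip
          (pvCutsFrom w.toList 0 ++ [(w.toList.length : Int)])).map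
        (fun ab => String.ofList (PySem.List.slice w.toList (some ab.1) (some ab.2))))).toList
      = pvExpand w.toList := by
    rw [PySem.Str.toList_join]
    simp only [List.map_map]
    have hcomp : (String.toList ∘ fun ab : Int × Int =>
        String.ofList (PySem.List.slice w.toList (some ab.1) (some ab.2)))
        = fun ab : Int × Int => PySem.List.slice w.toList (some ab.1) (some ab.2) := by
      funext ab
      simp
    rw [hcomp]
    exact hsplit
  rw [← key, String.ofList_toList]
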